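-- pv_equiv track=rewrite | github.com/hydrospirt/test_task_sarafan | test_task_1/main.py | sequence_generator
-- ===== SOURCE A (Python) =====
-- from typing import Generator
--
-- def sequence_generator(sequence_length: int) -> Generator[str, None, None]:
--     count = 0
--     for i in range(1, sequence_length + 1):
--         for j in range(i):
--             count += 1
--             if count > sequence_length:
--                 return
--             yield str(i)
-- ===== SOURCE B (Python) =====
-- from typing import Generator
--
-- def sequence_generator(sequence_length: int) -> Generator[str, None, None]:
--     value = 1
--     remaining = 1
--     for _ in range(sequence_length):
--         yield str(value)
--         remaining -= 1
--         if remaining == 0: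
--             value += 1
--             remaining = value
-- ===== Notes on version B (the rewrite author's own statement) =====
-- stated objective: simpler
-- what changed: Replaces A's nested outer/inner loops with a global count and early return by one flat loop of exactly sequence_length steps that carries the current value and the number of copies remaining in its block.
import Mathlib
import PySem

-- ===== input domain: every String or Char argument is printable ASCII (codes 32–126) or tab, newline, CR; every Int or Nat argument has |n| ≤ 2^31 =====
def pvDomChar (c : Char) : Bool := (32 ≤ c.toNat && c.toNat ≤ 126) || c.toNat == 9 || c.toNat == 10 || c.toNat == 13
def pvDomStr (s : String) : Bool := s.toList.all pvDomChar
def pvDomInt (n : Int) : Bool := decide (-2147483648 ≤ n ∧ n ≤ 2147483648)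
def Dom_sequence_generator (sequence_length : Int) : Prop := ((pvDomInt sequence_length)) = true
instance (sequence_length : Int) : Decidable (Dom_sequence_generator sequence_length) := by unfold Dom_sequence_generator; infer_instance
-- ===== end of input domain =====

-- B replaces A's nested loops with a global count and early return by one flat
-- loop of exactly sequence_length steps carrying (value, remaining); objective: simpler.
-- Both Pythons are generators; the ports return the list of yielded values.

-- ===== PORT A =====
-- inner loop 'for j in range(i)': yields so far, current count, and whether 'return' fired
def seqA_inner (n i : Int) : List Int → Int → (List String × Int × Bool)
  | [], c => ([], c, false)
  | _ :: js, c =>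
      if c + 1 > n then ([], c + 1, true)
      else
        let r := seqA_inner n i js (c + 1)
        (PySem.Int.toStr i :: r.1, r.2.1, r.2.2)

-- outer loop 'for i in range(1, n+1)'
def seqA_outer (n : Int) : List Int → Int → List String
  | [], _ => []
  | i :: rest, c =>
      let r := seqA_inner n i (PySem.List.pyRange 0 i 1) c
      if r.2.2 then r.1 else r.1 ++ seqA_outer n rest r.2.1

def sequence_generator (sequence_length : Int) : List String :=
  seqA_outer sequence_length (PySem.List.pyRange 1 (sequence_length + 1) 1) 0

-- ===== PORT B =====
-- one flat loop 'for _ in range(sequence_length)' carrying (value, remaining)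
def seqB_go : Nat → Int → Int → List String
  | 0, _, _ => []
  | Nat.succ k, value, remaining =>
      PySem.Int.toStr value ::
        (if remaining - 1 = 0 then seqB_go k (value + 1) (value + 1)
         else seqB_go k value (remaining - 1))

def sequence_generator_alt (sequence_length : Int) : List String :=
  seqB_go sequence_length.toNat 1 1

-- ===== PRECONDITION & SPEC =====
def Spec_sequence_generator (sequence_length : Int) (out : List String) : Prop := out = sequence_generator_alt sequence_length
instance (sequence_length : Int) (out : List String) : Decidable (Spec_sequence_generator sequence_length out) := by unfold Spec_sequence_generator; infer_instance

-- ===== CLAIM (what is proved, stated in full; the proofs are below) =====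
def Claim_equal_sequence_generator : Prop := ∀ (sequence_length : Int), Dom_sequence_generator sequence_length → Spec_sequence_generator sequence_length (sequence_generator sequence_length)

-- ===== LEMMAS AND PROOFS =====

-- B's loop, entered with `remaining = r ≥ 1`, first emits min r.toNat k copies of
-- str(value) and then continues with the next block.
theorem seqB_block (k : Nat) : ∀ (v r : Int), 1 ≤ r →
    seqB_go k v r =
      List.replicate (min r.toNat k) (PySem.Int.toStr v) ++
        seqB_go (k - min r.toNat k) (v + 1) (v + 1) := by
  induction k with
  | zero => intro v r _; simp [seqB_go]
  | succ k ih =>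
    intro v r hr
    by_cases h1 : r - 1 = 0
    · have : r = 1 := by omega
      subst this
      simp [seqB_go]
    · have h2 : 2 ≤ r := by omega
      have hmin : min r.toNat (k + 1) = min (r - 1).toNat k + 1 := by omega
      rw [seqB_go, if_neg h1, ih v (r - 1) (by omega), hmin]
      have hsub : k + 1 - (min (r - 1).toNat k + 1) = k - min (r - 1).toNat k := by omega
      rw [hsub]
      simp [List.replicate_succ]

-- A's inner loop: with count c ≤ n and i's copies given by the list js, it emits
-- js.length copies of str(i) if they fit, else exactly n - c copies and stops.
theorem seqA_inner_spec (n i : Int) : ∀ (js : List Int) (c : Int), c ≤ n →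
    seqA_inner n i js c =
      if c + (js.length : Int) ≤ n
      then (List.replicate js.length (PySem.Int.toStr i), c + js.length, false)
      else (List.replicate (n - c).toNat (PySem.Int.toStr i), n + 1, true) := by
  intro js
  induction js with
  | nil => intro c hc; simp [seqA_inner, hc]
  | cons j js ih =>
    intro c hc
    by_cases h1 : c + 1 > n
    · have hcn : c = n := by omega
      rw [seqA_inner, if_pos h1]
      rw [if_neg (by simp; omega)]
      simp [hcn]
    · rw [seqA_inner, if_neg h1, ih (c + 1) (by omega)]
      by_cases h2 : c + 1 + (js.length : Int) ≤ n
      · rw [if_pos h2, if_pos (by simp only [List.length_cons]; push_cast; omega)]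
        simp [List.replicate_succ]
        omega
      · rw [if_neg h2, if_neg (by simp only [List.length_cons] at h2 ⊢; push_cast at h2 ⊢; omega)]
        have : (n - c).toNat = (n - (c + 1)).toNat + 1 := by omega
        simp [this, List.replicate_succ]

-- A's outer loop from block v with count c = v(v-1)/2 equals B's loop with
-- fuel n - c, current value v and remaining = v.
theorem seqA_outer_spec (n : Int) : ∀ (m : Nat) (v c : Int),
    (n + 1 - v).toNat = m → 1 ≤ v → 2 * c = v * (v - 1) → c ≤ n →
    seqA_outer n (PySem.List.pyRange v (n + 1) 1) c = seqB_go (n - c).toNat v v := by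
  intro m
  induction m with
  | zero =>
    intro v c hm hv hc hcn
    have hvn : n + 1 ≤ v := by omega
    have hc0 : 0 ≤ 2 * c := by nlinarith
    have : 2 * n ≤ 2 * c := by nlinarith
    have hceq : c = n := by omega
    rw [PySem.List.pyRange_one_eq_nil hvn, seqA_outer]
    have h0 : (n - c).toNat = 0 := by omega
    rw [h0, seqB_go]
  | succ m ih =>
    intro v c hm hv hc hcn
    have hvn : v < n + 1 := by omega
    have hv0 : (0 : Int) ≤ v := by omega
    rw [PySem.List.pyRange_one_cons hvn, seqA_outer, seqA_inner_spec n v _ c hcn]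
    simp only [PySem.List.length_pyRange_one, Int.sub_zero, Int.toNat_of_nonneg hv0]
    by_cases h2 : c + v ≤ n
    · rw [if_pos h2]
      simp only [Bool.false_eq_true, if_false]
      rw [ih (v + 1) (c + v) (by omega) (by omega) (by nlinarith [hc]) h2,
          seqB_block _ v v hv]
      have hm1 : min v.toNat (n - c).toNat = v.toNat := by omega
      have hm2 : (n - c).toNat - v.toNat = (n - (c + v)).toNat := by omega
      rw [hm1, hm2]
    · rw [if_neg h2]
      simp only [if_true]
      rw [seqB_block _ v v hv]
      have hm1 : min v.toNat (n - c).toNat = (n - c).toNat := by omega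
      rw [hm1]
      simp [seqB_go]

-- ===== VERDICT (by name: the statement is the Claim_ definition above) =====
theorem sequence_generator_spec : Claim_equal_sequence_generator := by
  intro n _
  unfold Spec_sequence_generator sequence_generator sequence_generator_alt
  by_cases hn : n ≤ 0
  · rw [PySem.List.pyRange_one_eq_nil (by omega), seqA_outer]
    have : n.toNat = 0 := by omega
    rw [this, seqB_go]
  · have h := seqA_outer_spec n (n + 1 - 1).toNat 1 0 rfl (by omega) (by ring) (by omega)
    simpa using h
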